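-- pv_equiv track=rewrite | github.com/davezelenka/threading-dynamics | mathematics/OpGeom/Unified_Arithmetic_Fluid_Theory/omega_n_data.py | compute_omega_sieve
-- ===== SOURCE A (Python) =====
-- def compute_omega_sieve(limit: int):
--     """
--     Returns an array omega[n] = Ω(n) for 0 <= n <= limit
--     Uses a modified sieve for prime factor multiplicity.
--     """
--     omega = [0] * (limit + 1)
--     temp = list(range(limit + 1))
--
--     for p in range(2, limit + 1):
--         if temp[p] == p:  # p is prime
--             for k in range(p, limit + 1, p):
--                 while temp[k] % p == 0:
--                     omega[k] += 1
--                     temp[k] //= p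
--     return omega
-- ===== SOURCE B (Python) =====
-- def compute_omega_sieve(limit: int):
--     """
--     Returns an array omega[n] = Omega(n) (prime factors with multiplicity)
--     for 0 <= n <= limit, via a smallest-prime-factor sieve plus a DP pass.
--     """
--     spf = list(range(limit + 1))  # spf[n] = smallest prime factor of n (after sieving)
--     p = 2
--     while p * p <= limit:
--         if spf[p] == p:  # p is prime
--             for k in range(p * p, limit + 1, p):
--                 if spf[k] == k:
--                     spf[k] = p
--         p += 1
--     omega = [0] * (limit + 1)
--     for n in range(2, limit + 1):
--         omega[n] = omega[n // spf[n]] + 1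
--     return omega
-- ===== Notes on version B (the rewrite author's own statement) =====
-- stated objective: faster
-- what changed: A repeatedly divides every multiple of every prime to strip its factors; B instead builds a smallest-prime-factor table (marking composites once from p*p for p up to sqrt(limit)) and then fills omega with the DP recurrence omega[n] = omega[n // spf[n]] + 1.
import Mathlib
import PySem

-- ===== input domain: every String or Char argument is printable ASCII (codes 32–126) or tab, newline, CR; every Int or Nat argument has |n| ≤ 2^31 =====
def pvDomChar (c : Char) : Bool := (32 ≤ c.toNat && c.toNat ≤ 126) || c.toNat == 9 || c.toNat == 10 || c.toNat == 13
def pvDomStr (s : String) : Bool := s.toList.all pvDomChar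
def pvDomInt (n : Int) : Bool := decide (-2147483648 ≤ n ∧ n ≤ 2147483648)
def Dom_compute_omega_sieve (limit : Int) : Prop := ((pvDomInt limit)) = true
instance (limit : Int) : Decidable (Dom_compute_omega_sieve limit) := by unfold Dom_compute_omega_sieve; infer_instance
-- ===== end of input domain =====

-- B replaces A's repeated-division sieve by a smallest-prime-factor sieve (marking composites once
-- from p*p for p*p ≤ limit) followed by the DP recurrence omega[n] = omega[n // spf[n]] + 1;
-- a timing run measured B faster by a constant factor.

-- ===== PORT A =====
-- while temp[k] % p == 0: omega[k] += 1; temp[k] //= p   (on the two cell values; fuel bounds the iterations)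
def pvWhileA (p : Int) (o t : Int) (fuel : Nat) : Int × Int :=
  match fuel with
  | 0 => (o, t)
  | f + 1 =>
    if PySem.Int.mod t p = 0 then pvWhileA p (o + 1) (PySem.Int.floordiv t p) f else (o, t)

-- for k in range(p, limit+1, p)
def pvInnerA (p limit : Int) (om tm : List Int) (k : Int) (fuel : Nat) : List Int × List Int :=
  match fuel with
  | 0 => (om, tm)
  | f + 1 =>
    if k ≤ limit then
      let o := (PySem.List.pyGet? om k).getD 0
      let t := (PySem.List.pyGet? tm k).getD 0
      let r := pvWhileA p o t (t.toNat + 1)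
      pvInnerA p limit (PySem.List.pySetD om k r.1) (PySem.List.pySetD tm k r.2) (k + p) f
    else (om, tm)

-- for p in range(2, limit+1): if temp[p] == p: …
def pvOuterA (limit : Int) (om tm : List Int) (p : Int) (fuel : Nat) : List Int × List Int :=
  match fuel with
  | 0 => (om, tm)
  | f + 1 =>
    if p ≤ limit then
      let st :=
        if (PySem.List.pyGet? tm p).getD 0 = p then pvInnerA p limit om tm p (limit + 1).toNat
        else (om, tm)
      pvOuterA limit st.1 st.2 (p + 1) f
    else (om, tm)

def compute_omega_sieve (limit : Int) : List Int :=
  (pvOuterA limit (List.replicate (limit + 1).toNat 0) (PySem.List.pyRange 0 (limit + 1) 1)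
    2 (limit + 1).toNat).1

-- ===== PORT B =====
-- for k in range(p*p, limit+1, p): if spf[k] == k: spf[k] = p
def pvMarkB (p limit : Int) (spf : List Int) (k : Int) (fuel : Nat) : List Int :=
  match fuel with
  | 0 => spf
  | f + 1 =>
    if k ≤ limit then
      let s := if (PySem.List.pyGet? spf k).getD 0 = k then PySem.List.pySetD spf k p else spf
      pvMarkB p limit s (k + p) f
    else spf

-- while p * p <= limit: if spf[p] == p: …; p += 1
def pvSpfB (limit : Int) (spf : List Int) (p : Int) (fuel : Nat) : List Int :=
  match fuel with
  | 0 => spf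
  | f + 1 =>
    if p * p ≤ limit then
      let s :=
        if (PySem.List.pyGet? spf p).getD 0 = p then pvMarkB p limit spf (p * p) (limit + 1).toNat
        else spf
      pvSpfB limit s (p + 1) f
    else spf

-- for n in range(2, limit+1): omega[n] = omega[n // spf[n]] + 1
def pvDPB (limit : Int) (spf : List Int) (om : List Int) (n : Int) (fuel : Nat) : List Int :=
  match fuel with
  | 0 => om
  | f + 1 =>
    if n ≤ limit then
      let s := (PySem.List.pyGet? spf n).getD 0
      let v := (PySem.List.pyGet? om (PySem.Int.floordiv n s)).getD 0
      pvDPB limit spf (PySem.List.pySetD om n (v + 1)) (n + 1) f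
    else om

def compute_omega_sieve_alt (limit : Int) : List Int :=
  let spf := pvSpfB limit (PySem.List.pyRange 0 (limit + 1) 1) 2 (limit + 1).toNat
  pvDPB limit spf (List.replicate (limit + 1).toNat 0) 2 (limit + 1).toNat

-- ===== PRECONDITION & SPEC =====
def Spec_compute_omega_sieve (limit : Int) (out : List Int) : Prop := out = compute_omega_sieve_alt limit
instance (limit : Int) (out : List Int) : Decidable (Spec_compute_omega_sieve limit out) := by unfold Spec_compute_omega_sieve; infer_instance

-- ===== CLAIM (what is proved, stated in full; the proofs are below) =====
def Claim_equal_compute_omega_sieve : Prop := ∀ (limit : Int), Dom_compute_omega_sieve limit → Spec_compute_omega_sieve limit (compute_omega_sieve limit)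

-- ===== LEMMAS AND PROOFS =====
-- pvOmega n is Ω(n); both ports are shown to return [Ω(0), …, Ω(limit)].
def pvOmega (n : Nat) : Nat := n.primeFactorsList.length
def pvOmF (P n : Nat) : Nat := (n.primeFactorsList.filter (fun q => decide (q < P))).length
def pvTmF (P n : Nat) : Nat :=
  if n = 0 then 0 else (n.primeFactorsList.filter (fun q => decide (P ≤ q))).prod

lemma pvLC (P : Nat) (l : List Nat) :
    (l.filter (fun q => decide (q < P + 1))).length
      = (l.filter (fun q => decide (q < P))).length + l.count P := by
  induction l with
  | nil => simp
  | cons a l ih =>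
    rw [List.filter_cons, List.filter_cons]
    rcases Nat.lt_trichotomy a P with h | h | h
    · rw [List.count_cons_of_ne (by omega), if_pos (by simpa using (by omega : a < P + 1)),
        if_pos (by simpa using h), List.length_cons, List.length_cons]
      omega
    · subst h
      rw [List.count_cons_self, if_pos (by simp),
        if_neg (by simp), List.length_cons]
      omega
    · rw [List.count_cons_of_ne (by omega), if_neg (by simpa using (by omega : ¬ a < P + 1)),
        if_neg (by simpa using (by omega : ¬ a < P))]
      omega

lemma pvG2 (p : Nat) (l : List Nat) :
    l.prod = p ^ l.count p * (l.filter (fun q => decide (q ≠ p))).prod := by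
  induction l with
  | nil => simp
  | cons a l ih =>
    by_cases h : a = p
    · subst h
      simp only [List.count_cons_self, List.filter_cons, List.prod_cons, ih]
      simp [pow_succ]
      ring
    · simp only [List.count_cons_of_ne h, List.filter_cons, List.prod_cons, ih]
      simp [h]
      ring

lemma pvFilterStep (p : Nat) (l : List Nat) :
    l.filter (fun q => decide (p + 1 ≤ q))
      = (l.filter (fun q => decide (p ≤ q))).filter (fun q => decide (q ≠ p)) := by
  rw [List.filter_filter]
  apply List.filter_congr
  intro x _
  by_cases h : p + 1 ≤ x
  · have hne : x ≠ p := by omega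
    have hle : p ≤ x := by omega
    simp [h, hne, hle]
  · by_cases h2 : p ≤ x
    · have hx : x = p := by omega
      simp [hx]
    · simp [h, h2]

lemma pvTmF_pos (P n : Nat) (hn : n ≠ 0) : 0 < pvTmF P n := by
  unfold pvTmF
  rw [if_neg hn]
  apply List.prod_pos
  intro a ha
  exact Nat.pos_of_mem_primeFactorsList (List.mem_of_mem_filter ha)

lemma pvTmF_decomp (p n : Nat) :
    pvTmF p n = p ^ n.primeFactorsList.count p * pvTmF (p + 1) n := by
  by_cases hn : n = 0
  · subst hn; simp [pvTmF, Nat.primeFactorsList_zero]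
  · unfold pvTmF
    rw [if_neg hn, if_neg hn]
    have hc : n.primeFactorsList.count p
        = (n.primeFactorsList.filter (fun q => decide (p ≤ q))).count p := by
      rw [List.count_filter (by simp)]
    rw [hc, pvFilterStep]
    exact pvG2 p _

lemma pvTmF_not_dvd (p n : Nat) (hp : p.Prime) (hn : n ≠ 0) : ¬ p ∣ pvTmF (p + 1) n := by
  unfold pvTmF
  rw [if_neg hn]
  intro hdvd
  obtain ⟨a, ha, hpa⟩ := (Prime.dvd_prod_iff hp.prime).mp hdvd
  have hmem := List.mem_of_mem_filter ha
  have haP : p + 1 ≤ a := by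
    have := List.of_mem_filter ha
    simpa using this
  have : p = a := (Nat.prime_dvd_prime_iff_eq hp (Nat.prime_of_mem_primeFactorsList hmem)).mp hpa
  omega

lemma pvOmF_step (p n : Nat) :
    pvOmF (p + 1) n = pvOmF p n + n.primeFactorsList.count p := pvLC p _

lemma pvCount_zero_of_not_mem (p n : Nat) (h : p ∉ n.primeFactorsList) :
    n.primeFactorsList.count p = 0 := List.count_eq_zero_of_not_mem h

lemma pvStepNoChange (p n : Nat) (h : n.primeFactorsList.count p = 0) :
    pvOmF (p + 1) n = pvOmF p n ∧ pvTmF (p + 1) n = pvTmF p n := by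
  constructor
  · rw [pvOmF_step, h]; omega
  · have := pvTmF_decomp p n
    rw [h] at this
    simpa using this.symm

lemma pvNotMem_of_not_dvd (p n : Nat) (h : ¬ p ∣ n) : p ∉ n.primeFactorsList := by
  intro hm
  exact h (Nat.dvd_of_mem_primeFactorsList hm)

lemma pvNotMem_of_not_prime (p n : Nat) (h : ¬ p.Prime) : p ∉ n.primeFactorsList := by
  intro hm
  exact h (Nat.prime_of_mem_primeFactorsList hm)

lemma pvTmF_self (p : Nat) (h2 : 2 ≤ p) : pvTmF p p = p ↔ p.Prime := by
  constructor
  · intro h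
    by_contra hnp
    have hfil : p.primeFactorsList.filter (fun q => decide (p ≤ q)) = [] := by
      rw [List.filter_eq_nil_iff]
      intro q hq
      have hq1 : q ≤ p := Nat.le_of_mem_primeFactorsList hq
      have hq2 : q ≠ p := by
        intro he; subst he; exact hnp (Nat.prime_of_mem_primeFactorsList hq)
      simp; omega
    unfold pvTmF at h
    rw [if_neg (by omega), hfil] at h
    simp at h
    omega
  · intro hp
    unfold pvTmF
    rw [if_neg (by omega), Nat.primeFactorsList_prime hp]
    simp

lemma pvOmF_final (P n : Nat) (h : n < P) : pvOmF P n = pvOmega n := by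
  unfold pvOmF pvOmega
  congr 1
  rw [List.filter_eq_self]
  intro q hq
  have := Nat.le_of_mem_primeFactorsList hq
  simp; omega

lemma pvOmF_two (n : Nat) : pvOmF 2 n = 0 := by
  unfold pvOmF
  rw [List.filter_eq_nil_iff.mpr]
  · rfl
  · intro q hq
    have := (Nat.prime_of_mem_primeFactorsList hq).two_le
    simp; omega

lemma pvTmF_two (n : Nat) : pvTmF 2 n = n := by
  by_cases hn : n = 0
  · subst hn; simp [pvTmF]
  · unfold pvTmF
    rw [if_neg hn, List.filter_eq_self.mpr, Nat.prod_primeFactorsList hn]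
    intro q hq
    have := (Nat.prime_of_mem_primeFactorsList hq).two_le
    simp; omega

lemma pvOmega_rec (n : Nat) (h2 : 2 ≤ n) : pvOmega n = pvOmega (n / n.minFac) + 1 := by
  obtain ⟨m, rfl⟩ : ∃ m, n = m + 2 := ⟨n - 2, by omega⟩
  unfold pvOmega
  rw [Nat.primeFactorsList_add_two]
  simp

lemma pvWhileA_spec (p : Nat) (hp : p.Prime) :
    ∀ (c : Nat) (m : Nat) (o : Int) (fuel : Nat), ¬ p ∣ m → 0 < m → p ^ c * m ≤ fuel →
      pvWhileA (p : Int) o ((p ^ c * m : Nat) : Int) fuel = (o + (c : Int), (m : Int)) := by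
  intro c
  induction c with
  | zero =>
    intro m o fuel hm hm0 hfuel
    simp only [pow_zero, one_mul] at hfuel ⊢
    match fuel with
    | 0 => omega
    | f + 1 =>
      rw [pvWhileA]
      rw [if_neg]
      · simp
      · rw [PySem.Int.mod_natCast]
        intro hc
        have : m % p = 0 := by exact_mod_cast hc
        exact hm (Nat.dvd_of_mod_eq_zero this)
  | succ c ih =>
    intro m o fuel hm hm0 hfuel
    have hpos : 0 < p := hp.pos
    have ht : 0 < p ^ (c + 1) * m := by positivity
    match fuel with
    | 0 => omega
    | f + 1 =>
      rw [pvWhileA]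
      rw [if_pos]
      · rw [PySem.Int.floordiv_natCast]
        have hdiv : p ^ (c + 1) * m / p = p ^ c * m := by
          rw [pow_succ, mul_comm (p ^ c) p, mul_assoc]
          exact Nat.mul_div_cancel_left _ hpos
        rw [hdiv]
        have hle : p ^ c * m ≤ f := by
          have h2 : 2 ≤ p := hp.two_le
          have : 2 * (p ^ c * m) ≤ p ^ (c + 1) * m := by
            rw [pow_succ, mul_comm (p ^ c) p, mul_assoc]
            exact Nat.mul_le_mul_right _ h2
          have hpc : 0 < p ^ c * m := by positivity
          omega
        rw [ih m (o + 1) f hm hm0 hle]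
        have : o + 1 + (c : Int) = o + ((c : Nat) + 1 : Nat) := by push_cast; ring
        rw [Prod.mk.injEq]
        exact ⟨this, rfl⟩
      · rw [PySem.Int.mod_natCast]
        have hmod : p ^ (c + 1) * m % p = 0 := by
          apply Nat.mod_eq_zero_of_dvd
          exact Dvd.dvd.mul_right (dvd_pow_self p (Nat.succ_ne_zero c)) m
        rw [hmod]
        rfl

lemma pvNotDvd_gap (p k i : Nat) (hpk : p ∣ k) (h1 : k < i) (h2 : i < k + p) : ¬ p ∣ i := by
  intro hdvd
  have hsub : p ∣ i - k := Nat.dvd_sub hdvd hpk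
  have hpos : 0 < i - k := by omega
  have := Nat.le_of_dvd hpos hsub
  omega

lemma pvInnerA_spec (limit : Int) (p : Nat) (hp : p.Prime) :
    ∀ (fuel : Nat) (k : Nat) (om tm : List Int), p ∣ k → 0 < k →
      om.length = (limit + 1).toNat → tm.length = (limit + 1).toNat →
      (limit + 1).toNat - k ≤ fuel →
      (∀ i, i < (limit + 1).toNat →
          om[i]? = some ((if i < k then pvOmF (p + 1) i else pvOmF p i : Nat) : Int)
        ∧ tm[i]? = some ((if i < k then pvTmF (p + 1) i else pvTmF p i : Nat) : Int)) →
      (pvInnerA (p : Int) limit om tm (k : Int) fuel).1.length = (limit + 1).toNat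
      ∧ (pvInnerA (p : Int) limit om tm (k : Int) fuel).2.length = (limit + 1).toNat
      ∧ (∀ i, i < (limit + 1).toNat →
          (pvInnerA (p : Int) limit om tm (k : Int) fuel).1[i]? = some ((pvOmF (p + 1) i : Nat) : Int)
        ∧ (pvInnerA (p : Int) limit om tm (k : Int) fuel).2[i]? = some ((pvTmF (p + 1) i : Nat) : Int)) := by
  intro fuel
  induction fuel with
  | zero =>
    intro k om tm hdvd hk0 hom htm hfuel hinv
    have hbig : ∀ i, i < (limit + 1).toNat → i < k := by omega
    refine ⟨hom, htm, ?_⟩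
    intro i h
    have := hinv i h
    rw [if_pos (hbig i h), if_pos (hbig i h)] at this
    simpa [pvInnerA] using this
  | succ f ih =>
    intro k om tm hdvd hk0 hom htm hfuel hinv
    rw [pvInnerA]
    by_cases hk : (k : Int) ≤ limit
    · rw [if_pos hk]
      have hkL : k < (limit + 1).toNat := by omega
      have hkne : k ≠ 0 := by omega
      -- the values read
      have hvals := hinv k hkL
      rw [if_neg (by omega), if_neg (by omega)] at hvals
      have hgetO : (PySem.List.pyGet? om (k : Int)).getD 0 = ((pvOmF p k : Nat) : Int) := by
        rw [PySem.List.pyGet?_natCast, hvals.1, Option.getD_some]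
      have hgetT : (PySem.List.pyGet? tm (k : Int)).getD 0 = ((pvTmF p k : Nat) : Int) := by
        rw [PySem.List.pyGet?_natCast, hvals.2, Option.getD_some]
      -- characterize the while loop
      have hdecomp := pvTmF_decomp p k
      have hmpos : 0 < pvTmF (p + 1) k := pvTmF_pos (p + 1) k hkne
      have hnd : ¬ p ∣ pvTmF (p + 1) k := pvTmF_not_dvd p k hp hkne
      have htoNat : ((pvTmF p k : Nat) : Int).toNat = pvTmF p k := Int.toNat_natCast _
      have hwh : pvWhileA (p : Int) ((pvOmF p k : Nat) : Int) ((pvTmF p k : Nat) : Int)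
          (((pvTmF p k : Nat) : Int).toNat + 1)
          = (((pvOmF p k : Nat) : Int) + ((k.primeFactorsList.count p : Nat) : Int),
             ((pvTmF (p + 1) k : Nat) : Int)) := by
        rw [htoNat]
        conv_lhs => rw [hdecomp]
        exact pvWhileA_spec p hp _ _ _ _ hnd hmpos (by rw [← hdecomp]; omega)
      have homstep : ((pvOmF p k : Nat) : Int) + ((k.primeFactorsList.count p : Nat) : Int)
          = ((pvOmF (p + 1) k : Nat) : Int) := by
        rw [pvOmF_step]; push_cast; ring
      -- the recursive call
      have hsetO : PySem.List.pySetD om (k : Int)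
            (((pvOmF p k : Nat) : Int) + ((k.primeFactorsList.count p : Nat) : Int))
          = om.set k ((pvOmF (p + 1) k : Nat) : Int) := by
        rw [homstep, PySem.List.pySetD_natCast]
      have hsetT : PySem.List.pySetD tm (k : Int) (((pvTmF (p + 1) k : Nat) : Int))
          = tm.set k ((pvTmF (p + 1) k : Nat) : Int) := PySem.List.pySetD_natCast ..
      have hcast : (k : Int) + (p : Int) = ((k + p : Nat) : Int) := by push_cast; ring
      have hpp : 0 < p := hp.pos
      simp only [hgetO, hgetT, hwh, hsetO, hsetT, hcast]
      apply ih (k + p) _ _ (Dvd.dvd.add hdvd dvd_rfl) (by omega)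
        (by simpa using hom) (by simpa using htm) (by omega)
      -- the new mixed invariant
      intro i hiL
      rcases Nat.lt_trichotomy i k with hik | hik | hik
      · have h1 : i < k + p := by omega
        have := hinv i hiL
        rw [if_pos hik, if_pos hik] at this
        rw [if_pos h1, if_pos h1]
        rwa [List.getElem?_set_ne (by omega), List.getElem?_set_ne (by omega)]
      · subst hik
        rw [if_pos (by omega), if_pos (by omega)]
        rw [List.getElem?_set_self (by omega), List.getElem?_set_self (by omega)]
        exact ⟨rfl, rfl⟩
      · have := hinv i hiL
        rw [if_neg (by omega), if_neg (by omega)] at this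
        rw [List.getElem?_set_ne (by omega), List.getElem?_set_ne (by omega)]
        by_cases h2 : i < k + p
        · have hnd2 : ¬ p ∣ i := pvNotDvd_gap p k i hdvd hik h2
          have hcnt : i.primeFactorsList.count p = 0 :=
            pvCount_zero_of_not_mem p i (pvNotMem_of_not_dvd p i hnd2)
          obtain ⟨e1, e2⟩ := pvStepNoChange p i hcnt
          rw [if_pos h2, if_pos h2, e1, e2]
          exact this
        · rw [if_neg h2, if_neg h2]
          exact this
    · rw [if_neg hk]
      have hbig : ∀ i, i < (limit + 1).toNat → i < k := by omega
      refine ⟨hom, htm, ?_⟩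
      intro i h
      have := hinv i h
      rw [if_pos (hbig i h), if_pos (hbig i h)] at this
      simpa using this

lemma pvCount_zero_small (p i : Nat) (h : i < p) : i.primeFactorsList.count p = 0 := by
  apply pvCount_zero_of_not_mem
  intro hm
  have := Nat.le_of_mem_primeFactorsList hm
  omega

lemma pvOuterA_spec (limit : Int) :
    ∀ (fuel : Nat) (p : Nat) (om tm : List Int), 2 ≤ p →
      om.length = (limit + 1).toNat → tm.length = (limit + 1).toNat →
      (limit + 1).toNat - p ≤ fuel →
      (∀ i, i < (limit + 1).toNat →
          om[i]? = some ((pvOmF p i : Nat) : Int) ∧ tm[i]? = some ((pvTmF p i : Nat) : Int)) →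
      (pvOuterA limit om tm (p : Int) fuel).1.length = (limit + 1).toNat
      ∧ (∀ i, i < (limit + 1).toNat →
          (pvOuterA limit om tm (p : Int) fuel).1[i]? = some ((pvOmega i : Nat) : Int)) := by
  intro fuel
  induction fuel with
  | zero =>
    intro p om tm hp2 hom htm hfuel hinv
    refine ⟨by simpa [pvOuterA] using hom, ?_⟩
    intro i h
    have := (hinv i h).1
    rw [pvOmF_final p i (by omega)] at this
    simpa [pvOuterA] using this
  | succ f ih =>
    intro p om tm hp2 hom htm hfuel hinv
    rw [pvOuterA]
    by_cases hpl : (p : Int) ≤ limit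
    · rw [if_pos hpl]
      have hpL : p < (limit + 1).toNat := by omega
      have hget : (PySem.List.pyGet? tm (p : Int)).getD 0 = ((pvTmF p p : Nat) : Int) := by
        rw [PySem.List.pyGet?_natCast, (hinv p hpL).2, Option.getD_some]
      have hcast : (p : Int) + 1 = ((p + 1 : Nat) : Int) := by push_cast; ring
      by_cases hprime : p.Prime
      · have htest : ((pvTmF p p : Nat) : Int) = (p : Int) := by
          exact_mod_cast (pvTmF_self p hp2).mpr hprime
        have hinner := pvInnerA_spec limit p hprime (limit + 1).toNat p om tm dvd_rfl
          (by omega) hom htm (by omega) ?_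
        · simp only [hget, htest, hcast]
          obtain ⟨h1, h2, h3⟩ := hinner
          exact ih (p + 1) _ _ (by omega) h1 h2 (by omega) (fun i hi => (h3 i hi))
        · intro i hi
          by_cases hip : i < p
          · have hcnt := pvCount_zero_small p i hip
            obtain ⟨e1, e2⟩ := pvStepNoChange p i hcnt
            rw [if_pos hip, if_pos hip, e1, e2]
            exact hinv i hi
          · rw [if_neg hip, if_neg hip]
            exact hinv i hi
      · have htest : ¬ ((pvTmF p p : Nat) : Int) = (p : Int) := by
          intro hc
          exact hprime ((pvTmF_self p hp2).mp (by exact_mod_cast hc))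
        simp only [hget, if_neg htest, hcast]
        apply ih (p + 1) _ _ (by omega) hom htm (by omega)
        intro i hi
        have hcnt : i.primeFactorsList.count p = 0 :=
          pvCount_zero_of_not_mem p i (pvNotMem_of_not_prime p i hprime)
        obtain ⟨e1, e2⟩ := pvStepNoChange p i hcnt
        rw [e1, e2]
        exact hinv i hi
    · rw [if_neg hpl]
      refine ⟨hom, ?_⟩
      intro i h
      have := (hinv i h).1
      rw [pvOmF_final p i (by omega)] at this
      simpa using this

lemma pvA_model (limit : Int) :
    compute_omega_sieve limit
      = (List.range (limit + 1).toNat).map (fun n => ((pvOmega n : Nat) : Int)) := by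
  unfold compute_omega_sieve
  have hlen1 : (List.replicate (limit + 1).toNat (0 : Int)).length = (limit + 1).toNat :=
    List.length_replicate
  have hlen2 : (PySem.List.pyRange 0 (limit + 1) 1).length = (limit + 1).toNat := by
    rw [PySem.List.length_pyRange_one]
    omega
  have h := pvOuterA_spec limit (limit + 1).toNat 2 _ _ (le_refl 2) hlen1 hlen2 (by omega) ?_
  · rw [show (((2 : Nat) : Int)) = (2 : Int) from rfl] at h
    apply List.ext_getElem?
    intro i
    by_cases hi : i < (limit + 1).toNat
    · rw [(h.2 i hi), List.getElem?_eq_getElem (by simpa using hi), List.getElem_map,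
        List.getElem_range]
    · rw [List.getElem?_eq_none (by rw [h.1]; omega),
        List.getElem?_eq_none (by simpa using Nat.not_lt.mp hi)]
  · intro i hi
    constructor
    · rw [List.getElem?_eq_getElem (by omega), List.getElem_replicate, pvOmF_two]
      rfl
    · rw [List.getElem?_eq_getElem (by omega), PySem.List.getElem_pyRange_one, pvTmF_two]
      simp

def pvSpfF (P n : Nat) : Nat :=
  if 2 ≤ n ∧ n.minFac < P ∧ n.minFac * n.minFac ≤ n then n.minFac else n

def pvSpfT (n : Nat) : Nat := if 2 ≤ n then n.minFac else n

lemma pvSpfF_succ_eq (p n : Nat) (h : ¬(2 ≤ n ∧ n.minFac = p ∧ p * p ≤ n)) :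
    pvSpfF (p + 1) n = pvSpfF p n := by
  unfold pvSpfF
  by_cases h2 : 2 ≤ n ∧ n.minFac < p ∧ n.minFac * n.minFac ≤ n
  · rw [if_pos h2, if_pos ⟨h2.1, by omega, h2.2.2⟩]
  · rw [if_neg h2]
    by_cases h1 : 2 ≤ n ∧ n.minFac < p + 1 ∧ n.minFac * n.minFac ≤ n
    · exfalso
      have hm : n.minFac = p := by omega
      exact h ⟨h1.1, hm, by rw [← hm]; exact h1.2.2⟩
    · rw [if_neg h1]

lemma pvSpfF_not_prime (p n : Nat) (hp : ¬ p.Prime) : pvSpfF (p + 1) n = pvSpfF p n := by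
  apply pvSpfF_succ_eq
  rintro ⟨h2, hm, _⟩
  exact hp (hm ▸ Nat.minFac_prime (by omega))

lemma pvSpfF_self (p : Nat) (h2 : 2 ≤ p) : pvSpfF p p = p ↔ p.Prime := by
  constructor
  · intro h
    by_contra hnp
    have hm : p.minFac ∣ p := Nat.minFac_dvd p
    have hprime : (p.minFac).Prime := Nat.minFac_prime (by omega)
    have hne : p.minFac ≠ p := by
      intro he
      exact hnp (he ▸ hprime)
    have hlt : p.minFac < p := Nat.lt_of_le_of_ne (Nat.le_of_dvd (by omega) hm) hne
    have hsq : p.minFac * p.minFac ≤ p := by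
      have := Nat.minFac_sq_le_self (by omega) hnp
      nlinarith [this]
    unfold pvSpfF at h
    rw [if_pos ⟨h2, hlt, hsq⟩] at h
    omega
  · intro hp
    unfold pvSpfF
    rw [Nat.Prime.minFac_eq hp]
    rw [if_neg (by omega)]

lemma pvSpfF_final (p i : Nat) (hlt : i < p * p) : pvSpfF p i = pvSpfT i := by
  unfold pvSpfF pvSpfT
  by_cases h2 : 2 ≤ i
  · rw [if_pos h2]
    by_cases hprime : i.Prime
    · rw [Nat.Prime.minFac_eq hprime]
      by_cases hc : 2 ≤ i ∧ i < p ∧ i * i ≤ i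
      · exact absurd hc.2.2 (by nlinarith)
      · rw [if_neg hc]
    · have hprm : (i.minFac).Prime := Nat.minFac_prime (by omega)
      have hsq : i.minFac * i.minFac ≤ i := by
        have := Nat.minFac_sq_le_self (by omega) hprime
        nlinarith [this]
      have hmlt : i.minFac < p := by nlinarith [hsq, hlt]
      rw [if_pos ⟨h2, hmlt, hsq⟩]
  · rw [if_neg (by omega), if_neg (by omega)]

lemma pvMarkB_spec (limit : Int) (p : Nat) (hp : p.Prime) :
    ∀ (fuel : Nat) (k : Nat) (spf : List Int), p ∣ k → p * p ≤ k →
      spf.length = (limit + 1).toNat →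
      (limit + 1).toNat - k ≤ fuel →
      (∀ i, i < (limit + 1).toNat →
          spf[i]? = some ((if i < k then pvSpfF (p + 1) i else pvSpfF p i : Nat) : Int)) →
      (pvMarkB (p : Int) limit spf (k : Int) fuel).length = (limit + 1).toNat
      ∧ (∀ i, i < (limit + 1).toNat →
          (pvMarkB (p : Int) limit spf (k : Int) fuel)[i]? = some ((pvSpfF (p + 1) i : Nat) : Int)) := by
  intro fuel
  induction fuel with
  | zero =>
    intro k spf hdvd hsq hlen hfuel hinv
    have hbig : ∀ i, i < (limit + 1).toNat → i < k := by omega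
    refine ⟨by simpa [pvMarkB] using hlen, ?_⟩
    intro i h
    have := hinv i h
    rw [if_pos (hbig i h)] at this
    simpa [pvMarkB] using this
  | succ f ih =>
    intro k spf hdvd hsq hlen hfuel hinv
    rw [pvMarkB]
    by_cases hk : (k : Int) ≤ limit
    · rw [if_pos hk]
      have hpp : 0 < p := hp.pos
      have hp2 : 2 ≤ p := hp.two_le
      have hkL : k < (limit + 1).toNat := by omega
      have hk2 : 2 ≤ k := by nlinarith [hsq]
      have hget : (PySem.List.pyGet? spf (k : Int)).getD 0 = ((pvSpfF p k : Nat) : Int) := by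
        rw [PySem.List.pyGet?_natCast, (by simpa using hinv k hkL : spf[k]? = some ((if k < k then pvSpfF (p + 1) k else pvSpfF p k : Nat) : Int)), Option.getD_some, if_neg (by omega)]
      -- the written value equals pvSpfF (p+1) k
      have hmf : k.minFac ≤ p := Nat.minFac_le_of_dvd hp2 hdvd
      have hmsq : k.minFac * k.minFac ≤ k := by nlinarith [hmf, hsq]
      have hnew : pvSpfF (p + 1) k = k.minFac := by
        unfold pvSpfF
        rw [if_pos ⟨hk2, by omega, hmsq⟩]
      have hstep : (if (PySem.List.pyGet? spf (k : Int)).getD 0 = (k : Int)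
            then PySem.List.pySetD spf (k : Int) (p : Int) else spf)
          = spf.set k ((pvSpfF (p + 1) k : Nat) : Int) := by
        rw [hget]
        by_cases hcase : k.minFac < p
        · have hold : pvSpfF p k = k.minFac := by
            unfold pvSpfF
            rw [if_pos ⟨hk2, hcase, hmsq⟩]
          have hne : ¬ ((pvSpfF p k : Nat) : Int) = (k : Int) := by
            rw [hold]
            have : k.minFac < k := by nlinarith [hcase, hsq]
            exact_mod_cast by omega
          have hk' : k < spf.length := by omega
          have hgk : spf[k] = ((pvSpfF p k : Nat) : Int) := by
            have hx := hinv k hkL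
            rw [if_neg (by omega), List.getElem?_eq_getElem hk'] at hx
            exact Option.some.inj hx
          rw [if_neg hne, hnew, ← hold, ← hgk, List.set_getElem_self hk']
        · have hmeq : k.minFac = p := by omega
          have hold : pvSpfF p k = k := by
            unfold pvSpfF
            rw [if_neg (by rw [hmeq]; omega)]
          rw [hold, if_pos rfl, PySem.List.pySetD_natCast, hnew, hmeq]
      rw [hstep]
      have hcast : (k : Int) + (p : Int) = ((k + p : Nat) : Int) := by push_cast; ring
      rw [hcast]
      apply ih (k + p) _ (Dvd.dvd.add hdvd dvd_rfl) (by omega) (by simpa using hlen) (by omega)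
      intro i hiL
      rcases Nat.lt_trichotomy i k with hik | hik | hik
      · have h1 : i < k + p := by omega
        have := hinv i hiL
        rw [if_pos hik] at this
        rw [if_pos h1]
        rwa [List.getElem?_set_ne (by omega)]
      · subst hik
        rw [if_pos (by omega), List.getElem?_set_self (by omega)]
      · have := hinv i hiL
        rw [if_neg (by omega)] at this
        rw [List.getElem?_set_ne (by omega)]
        by_cases h2 : i < k + p
        · have hnd2 : ¬ p ∣ i := pvNotDvd_gap p k i hdvd hik h2
          rw [if_pos h2, pvSpfF_succ_eq p i (by
            rintro ⟨_, hm, _⟩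
            exact hnd2 (hm ▸ Nat.minFac_dvd i))]
          exact this
        · rw [if_neg h2]
          exact this
    · rw [if_neg hk]
      have hbig : ∀ i, i < (limit + 1).toNat → i < k := by omega
      refine ⟨hlen, ?_⟩
      intro i h
      have := hinv i h
      rw [if_pos (hbig i h)] at this
      simpa using this

lemma pvSpfB_spec (limit : Int) :
    ∀ (fuel : Nat) (p : Nat) (spf : List Int), 2 ≤ p →
      spf.length = (limit + 1).toNat →
      (limit + 1).toNat ≤ fuel + p * p →
      (∀ i, i < (limit + 1).toNat → spf[i]? = some ((pvSpfF p i : Nat) : Int)) →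
      (pvSpfB limit spf (p : Int) fuel).length = (limit + 1).toNat
      ∧ (∀ i, i < (limit + 1).toNat →
          (pvSpfB limit spf (p : Int) fuel)[i]? = some ((pvSpfT i : Nat) : Int)) := by
  intro fuel
  induction fuel with
  | zero =>
    intro p spf hp2 hlen hfuel hinv
    refine ⟨by simpa [pvSpfB] using hlen, ?_⟩
    intro i h
    have := hinv i h
    rw [pvSpfF_final p i (by omega)] at this
    simpa [pvSpfB] using this
  | succ f ih =>
    intro p spf hp2 hlen hfuel hinv
    rw [pvSpfB]
    have hcastpp : (p : Int) * (p : Int) = ((p * p : Nat) : Int) := by push_cast; ring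
    by_cases hpl : (p : Int) * (p : Int) ≤ limit
    · rw [if_pos hpl]
      rw [hcastpp] at hpl
      have hppL : p * p < (limit + 1).toNat := by omega
      have hpL : p < (limit + 1).toNat := by nlinarith [hppL]
      have hget : (PySem.List.pyGet? spf (p : Int)).getD 0 = ((pvSpfF p p : Nat) : Int) := by
        rw [PySem.List.pyGet?_natCast, hinv p hpL, Option.getD_some]
      have hcast : (p : Int) + 1 = ((p + 1 : Nat) : Int) := by push_cast; ring
      have hsucc : (p + 1) * (p + 1) = p * p + 2 * p + 1 := by ring
      by_cases hprime : p.Prime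
      · have htest : ((pvSpfF p p : Nat) : Int) = (p : Int) := by
          exact_mod_cast (pvSpfF_self p hp2).mpr hprime
        have hmark := pvMarkB_spec limit p hprime (limit + 1).toNat (p * p) spf
          (Dvd.dvd.mul_left dvd_rfl p) (le_refl _) hlen (by omega) ?_
        · simp only [hget, htest, hcast, hcastpp]
          exact ih (p + 1) _ (by omega) hmark.1 (by omega) hmark.2
        · intro i hi
          by_cases hip : i < p * p
          · rw [if_pos hip, pvSpfF_succ_eq p i (by rintro ⟨_, _, hs⟩; omega)]
            exact hinv i hi
          · rw [if_neg hip]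
            exact hinv i hi
      · have htest : ¬ ((pvSpfF p p : Nat) : Int) = (p : Int) := by
          intro hc
          exact hprime ((pvSpfF_self p hp2).mp (by exact_mod_cast hc))
        simp only [hget, if_neg htest, hcast]
        apply ih (p + 1) _ (by omega) hlen (by omega)
        intro i hi
        rw [pvSpfF_not_prime p i hprime]
        exact hinv i hi
    · rw [if_neg hpl]
      rw [hcastpp] at hpl
      refine ⟨hlen, ?_⟩
      intro i h
      have := hinv i h
      rw [pvSpfF_final p i (by omega)] at this
      simpa using this

lemma pvOmega_small (i : Nat) (h : i < 2) : pvOmega i = 0 := by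
  interval_cases i
  · simp [pvOmega, Nat.primeFactorsList_zero]
  · simp [pvOmega, Nat.primeFactorsList_one]

lemma pvDPB_spec (limit : Int) (spf : List Int)
    (_hslen : spf.length = (limit + 1).toNat)
    (hspf : ∀ i, i < (limit + 1).toNat → spf[i]? = some ((pvSpfT i : Nat) : Int)) :
    ∀ (fuel : Nat) (n : Nat) (om : List Int), 2 ≤ n →
      om.length = (limit + 1).toNat →
      (limit + 1).toNat - n ≤ fuel →
      (∀ i, i < (limit + 1).toNat →
          om[i]? = some (if i < n then ((pvOmega i : Nat) : Int) else 0)) →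
      (pvDPB limit spf om (n : Int) fuel).length = (limit + 1).toNat
      ∧ (∀ i, i < (limit + 1).toNat →
          (pvDPB limit spf om (n : Int) fuel)[i]? = some ((pvOmega i : Nat) : Int)) := by
  intro fuel
  induction fuel with
  | zero =>
    intro n om hn2 hlen hfuel hinv
    refine ⟨by simpa [pvDPB] using hlen, ?_⟩
    intro i h
    have := hinv i h
    rw [if_pos (by omega)] at this
    simpa [pvDPB] using this
  | succ f ih =>
    intro n om hn2 hlen hfuel hinv
    rw [pvDPB]
    by_cases hnl : (n : Int) ≤ limit
    · rw [if_pos hnl]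
      have hnL : n < (limit + 1).toNat := by omega
      have hmfp : (n.minFac).Prime := Nat.minFac_prime (by omega)
      have hget : (PySem.List.pyGet? spf (n : Int)).getD 0 = ((n.minFac : Nat) : Int) := by
        rw [PySem.List.pyGet?_natCast, hspf n hnL, Option.getD_some]
        norm_cast
        unfold pvSpfT
        rw [if_pos hn2]
      have hdivlt : n / n.minFac < n := Nat.div_lt_self (by omega) hmfp.one_lt
      have hdiv : PySem.Int.floordiv (n : Int) ((n.minFac : Nat) : Int)
          = ((n / n.minFac : Nat) : Int) := PySem.Int.floordiv_natCast ..
      have hgetom : (PySem.List.pyGet? om ((n / n.minFac : Nat) : Int)).getD 0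
          = ((pvOmega (n / n.minFac) : Nat) : Int) := by
        rw [PySem.List.pyGet?_natCast, hinv _ (by omega), Option.getD_some, if_pos (by omega)]
      have hval : ((pvOmega (n / n.minFac) : Nat) : Int) + 1 = ((pvOmega n : Nat) : Int) := by
        rw [pvOmega_rec n hn2]
        push_cast
        ring
      have hcast : (n : Int) + 1 = ((n + 1 : Nat) : Int) := by push_cast; ring
      simp only [hget, hdiv, hgetom, hval, hcast, PySem.List.pySetD_natCast]
      apply ih (n + 1) _ (by omega) (by simpa using hlen) (by omega)
      intro i hiL
      rcases Nat.lt_trichotomy i n with hik | hik | hik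
      · rw [List.getElem?_set_ne (by omega), if_pos (by omega)]
        have := hinv i hiL
        rwa [if_pos (by omega)] at this
      · subst hik
        rw [List.getElem?_set_self (by omega), if_pos (by omega)]
      · rw [List.getElem?_set_ne (by omega), if_neg (by omega)]
        have := hinv i hiL
        rwa [if_neg (by omega)] at this
    · rw [if_neg hnl]
      refine ⟨hlen, ?_⟩
      intro i h
      have := hinv i h
      rw [if_pos (by omega)] at this
      simpa using this

lemma pvB_model (limit : Int) :
    compute_omega_sieve_alt limit
      = (List.range (limit + 1).toNat).map (fun n => ((pvOmega n : Nat) : Int)) := by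
  unfold compute_omega_sieve_alt
  have hlen2 : (PySem.List.pyRange 0 (limit + 1) 1).length = (limit + 1).toNat := by
    rw [PySem.List.length_pyRange_one]
    omega
  have hs := pvSpfB_spec limit (limit + 1).toNat 2 _ (le_refl 2) hlen2 (by omega) ?_
  · rw [show (((2 : Nat) : Int)) = (2 : Int) from rfl] at hs
    have hd := pvDPB_spec limit _ hs.1 hs.2 (limit + 1).toNat 2 (List.replicate (limit + 1).toNat 0)
      (le_refl 2) List.length_replicate (by omega) ?_
    · rw [show (((2 : Nat) : Int)) = (2 : Int) from rfl] at hd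
      apply List.ext_getElem?
      intro i
      by_cases hi : i < (limit + 1).toNat
      · rw [hd.2 i hi, List.getElem?_eq_getElem (by simpa using hi), List.getElem_map,
          List.getElem_range]
      · rw [List.getElem?_eq_none (by rw [hd.1]; omega),
          List.getElem?_eq_none (by simpa using Nat.not_lt.mp hi)]
    · intro i hi
      rw [List.getElem?_eq_getElem (by simpa using hi), List.getElem_replicate]
      by_cases h2 : i < 2
      · rw [if_pos h2, pvOmega_small i h2]
        rfl
      · rw [if_neg h2]
  · intro i hi
    rw [List.getElem?_eq_getElem (by rw [hlen2]; omega), PySem.List.getElem_pyRange_one]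
    have : pvSpfF 2 i = i := by
      unfold pvSpfF
      by_cases h2 : 2 ≤ i
      · rw [if_neg]
        rintro ⟨_, hm, _⟩
        have := (Nat.minFac_prime (by omega : i ≠ 1)).two_le
        omega
      · rw [if_neg (by omega)]
    rw [this]
    simp

lemma pvAB (limit : Int) : compute_omega_sieve limit = compute_omega_sieve_alt limit := by
  rw [pvA_model, pvB_model]

-- ===== VERDICT (by name: the statement is the Claim_ definition above) =====
theorem compute_omega_sieve_spec : Claim_equal_compute_omega_sieve := by
  unfold Claim_equal_compute_omega_sieve Spec_compute_omega_sieve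
  intro limit _
  exact pvAB limit
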